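-- pv_equiv track=rewrite | github.com/Zrayhere/dvc-pmd | build_boundary_tokens_yc2.py | match_action_group
-- ===== SOURCE A (Python) =====
-- ACTION_GROUPS = {
--     "CUT":    {"cut", "slice", "chop", "dice", "mince", "trim", "peel",
--                "shred", "grate", "julienne"},
--     "ADD":    {"add", "put", "place", "pour", "drizzle", "sprinkle", "drop",
--                "toss"},
--     "MIX":    {"mix", "stir", "whisk", "combine", "blend", "fold", "beat",
--                "knead"},
--     "COOK":   {"cook", "fry", "bake", "roast", "boil", "simmer", "grill",
--                "saute", "sear", "broil", "steam", "braise", "toast", "heat",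
--                "warm", "microwave"},
--     "SERVE":  {"serve", "garnish", "plate", "arrange", "top", "decorate",
--                "finish"},
--     "REMOVE": {"remove", "take", "drain", "strain", "lift", "transfer",
--                "scoop"},
--     "SPREAD": {"spread", "coat", "brush", "rub", "smear", "glaze", "marinate",
--                "season"},
--     "SHAPE":  {"roll", "flatten", "shape", "form", "press", "fold", "wrap",
--                "stuff"},
--     "COVER":  {"cover", "wrap", "seal", "close", "lid"},
--     "FLIP":   {"flip", "turn", "rotate", "toss"},
-- }
--
-- def match_action_group(action):
--     """Map an action lemma to its action group, or None if unmatched."""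
--     if action is None:
--         return None
--     a = action.lower()
--     for group, verbs in ACTION_GROUPS.items():
--         if a in verbs:
--             return group
--     return None
-- ===== SOURCE B (Python) =====
-- VERB_TO_GROUP = {
--     "cut": "CUT",
--     "slice": "CUT",
--     "chop": "CUT",
--     "dice": "CUT",
--     "mince": "CUT",
--     "trim": "CUT",
--     "peel": "CUT",
--     "shred": "CUT",
--     "grate": "CUT",
--     "julienne": "CUT",
--     "add": "ADD",
--     "put": "ADD",
--     "place": "ADD",
--     "pour": "ADD",
--     "drizzle": "ADD",
--     "sprinkle": "ADD",
--     "drop": "ADD",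
--     "toss": "ADD",
--     "mix": "MIX",
--     "stir": "MIX",
--     "whisk": "MIX",
--     "combine": "MIX",
--     "blend": "MIX",
--     "fold": "MIX",
--     "beat": "MIX",
--     "knead": "MIX",
--     "cook": "COOK",
--     "fry": "COOK",
--     "bake": "COOK",
--     "roast": "COOK",
--     "boil": "COOK",
--     "simmer": "COOK",
--     "grill": "COOK",
--     "saute": "COOK",
--     "sear": "COOK",
--     "broil": "COOK",
--     "steam": "COOK",
--     "braise": "COOK",
--     "toast": "COOK",
--     "heat": "COOK",
--     "warm": "COOK",
--     "microwave": "COOK",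
--     "serve": "SERVE",
--     "garnish": "SERVE",
--     "plate": "SERVE",
--     "arrange": "SERVE",
--     "top": "SERVE",
--     "decorate": "SERVE",
--     "finish": "SERVE",
--     "remove": "REMOVE",
--     "take": "REMOVE",
--     "drain": "REMOVE",
--     "strain": "REMOVE",
--     "lift": "REMOVE",
--     "transfer": "REMOVE",
--     "scoop": "REMOVE",
--     "spread": "SPREAD",
--     "coat": "SPREAD",
--     "brush": "SPREAD",
--     "rub": "SPREAD",
--     "smear": "SPREAD",
--     "glaze": "SPREAD",
--     "marinate": "SPREAD",
--     "season": "SPREAD",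
--     "roll": "SHAPE",
--     "flatten": "SHAPE",
--     "shape": "SHAPE",
--     "form": "SHAPE",
--     "press": "SHAPE",
--     "wrap": "SHAPE",
--     "stuff": "SHAPE",
--     "cover": "COVER",
--     "seal": "COVER",
--     "close": "COVER",
--     "lid": "COVER",
--     "flip": "FLIP",
--     "turn": "FLIP",
--     "rotate": "FLIP",
-- }
--
--
-- def match_action_group(action):
--     """Map an action lemma to its action group, or None if unmatched."""
--     if action is None:
--         return None
--     return VERB_TO_GROUP.get(action.lower())
-- ===== Notes on version B (the rewrite author's own statement) =====
-- stated objective: idiomatic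
-- what changed: Replaces the per-call loop over the ten group sets with one flat module-level dict literal VERB_TO_GROUP (verb -> group, duplicate verbs kept under their first group), so the function is a single dict lookup.
import Mathlib
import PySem

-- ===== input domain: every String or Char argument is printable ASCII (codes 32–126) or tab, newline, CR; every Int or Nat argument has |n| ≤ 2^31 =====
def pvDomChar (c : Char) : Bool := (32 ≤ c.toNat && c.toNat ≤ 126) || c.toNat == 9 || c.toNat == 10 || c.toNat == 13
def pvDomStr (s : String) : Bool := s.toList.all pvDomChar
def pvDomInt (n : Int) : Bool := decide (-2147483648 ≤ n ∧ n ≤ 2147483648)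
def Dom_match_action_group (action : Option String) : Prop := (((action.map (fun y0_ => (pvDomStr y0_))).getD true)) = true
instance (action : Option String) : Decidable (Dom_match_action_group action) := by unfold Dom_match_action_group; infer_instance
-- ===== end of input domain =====

-- B replaces A's per-call scan over the ten group sets by one flat literal dict
-- VERB_TO_GROUP (verb -> group, first group wins for duplicate verbs) and a single
-- dict lookup (idiomatic).

-- ===== PORT A =====
-- module constant ACTION_GROUPS (dict of sets, insertion order), as its items list
def pvActionGroups : List (String × PySem.Set String) :=
  [ ("CUT",    PySem.Set.ofList ["cut", "slice", "chop", "dice", "mince", "trim", "peel",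
                                 "shred", "grate", "julienne"]),
    ("ADD",    PySem.Set.ofList ["add", "put", "place", "pour", "drizzle", "sprinkle", "drop",
                                 "toss"]),
    ("MIX",    PySem.Set.ofList ["mix", "stir", "whisk", "combine", "blend", "fold", "beat",
                                 "knead"]),
    ("COOK",   PySem.Set.ofList ["cook", "fry", "bake", "roast", "boil", "simmer", "grill",
                                 "saute", "sear", "broil", "steam", "braise", "toast", "heat",
                                 "warm", "microwave"]),
    ("SERVE",  PySem.Set.ofList ["serve", "garnish", "plate", "arrange", "top", "decorate",
                                 "finish"]),
    ("REMOVE", PySem.Set.ofList ["remove", "take", "drain", "strain", "lift", "transfer",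
                                 "scoop"]),
    ("SPREAD", PySem.Set.ofList ["spread", "coat", "brush", "rub", "smear", "glaze", "marinate",
                                 "season"]),
    ("SHAPE",  PySem.Set.ofList ["roll", "flatten", "shape", "form", "press", "fold", "wrap",
                                 "stuff"]),
    ("COVER",  PySem.Set.ofList ["cover", "wrap", "seal", "close", "lid"]),
    ("FLIP",   PySem.Set.ofList ["flip", "turn", "rotate", "toss"]) ]

-- A's for-loop over ACTION_GROUPS.items(): return the first group whose set contains a
def pvScanGroups (a : String) : List (String × PySem.Set String) → Option String
  | [] => none
  | (g, vs) :: rest => if PySem.Set.contains vs a then some g else pvScanGroups a rest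

def match_action_group (action : Option String) : Option String :=
  match action with
  | none => none
  | some s => pvScanGroups (PySem.Str.lower s) pvActionGroups

-- ===== PORT B =====
-- Source B's module constant: the flat literal dict VERB_TO_GROUP (unique keys,
-- duplicate verbs kept with their FIRST group)
def pvVerbTable : List (String × String) :=
  [ ("cut", "CUT"),
    ("slice", "CUT"),
    ("chop", "CUT"),
    ("dice", "CUT"),
    ("mince", "CUT"),
    ("trim", "CUT"),
    ("peel", "CUT"),
    ("shred", "CUT"),
    ("grate", "CUT"),
    ("julienne", "CUT"),
    ("add", "ADD"),
    ("put", "ADD"),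
    ("place", "ADD"),
    ("pour", "ADD"),
    ("drizzle", "ADD"),
    ("sprinkle", "ADD"),
    ("drop", "ADD"),
    ("toss", "ADD"),
    ("mix", "MIX"),
    ("stir", "MIX"),
    ("whisk", "MIX"),
    ("combine", "MIX"),
    ("blend", "MIX"),
    ("fold", "MIX"),
    ("beat", "MIX"),
    ("knead", "MIX"),
    ("cook", "COOK"),
    ("fry", "COOK"),
    ("bake", "COOK"),
    ("roast", "COOK"),
    ("boil", "COOK"),
    ("simmer", "COOK"),
    ("grill", "COOK"),
    ("saute", "COOK"),
    ("sear", "COOK"),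
    ("broil", "COOK"),
    ("steam", "COOK"),
    ("braise", "COOK"),
    ("toast", "COOK"),
    ("heat", "COOK"),
    ("warm", "COOK"),
    ("microwave", "COOK"),
    ("serve", "SERVE"),
    ("garnish", "SERVE"),
    ("plate", "SERVE"),
    ("arrange", "SERVE"),
    ("top", "SERVE"),
    ("decorate", "SERVE"),
    ("finish", "SERVE"),
    ("remove", "REMOVE"),
    ("take", "REMOVE"),
    ("drain", "REMOVE"),
    ("strain", "REMOVE"),
    ("lift", "REMOVE"),
    ("transfer", "REMOVE"),
    ("scoop", "REMOVE"),
    ("spread", "SPREAD"),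
    ("coat", "SPREAD"),
    ("brush", "SPREAD"),
    ("rub", "SPREAD"),
    ("smear", "SPREAD"),
    ("glaze", "SPREAD"),
    ("marinate", "SPREAD"),
    ("season", "SPREAD"),
    ("roll", "SHAPE"),
    ("flatten", "SHAPE"),
    ("shape", "SHAPE"),
    ("form", "SHAPE"),
    ("press", "SHAPE"),
    ("wrap", "SHAPE"),
    ("stuff", "SHAPE"),
    ("cover", "COVER"),
    ("seal", "COVER"),
    ("close", "COVER"),
    ("lid", "COVER"),
    ("flip", "FLIP"),
    ("turn", "FLIP"),
    ("rotate", "FLIP") ]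

def pvVerbToGroup : PySem.Dict String String := PySem.Dict.mk pvVerbTable

def match_action_group_alt (action : Option String) : Option String :=
  match action with
  | none => none
  | some s => pvVerbToGroup.get? (PySem.Str.lower s)

-- ===== PRECONDITION & SPEC =====
def Spec_match_action_group (action : Option String) (out : Option String) : Prop := out = match_action_group_alt action
instance (action : Option String) (out : Option String) : Decidable (Spec_match_action_group action out) := by unfold Spec_match_action_group; infer_instance

-- ===== CLAIM (what is proved, stated in full; the proofs are below) =====
def Claim_equal_match_action_group : Prop := ∀ (action : Option String), Dom_match_action_group action → Spec_match_action_group action (match_action_group action)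

-- ===== LEMMAS AND PROOFS =====

-- flatten A's groups table into (verb, group) pairs, in order (duplicates kept)
def pvFlat (tbl : List (String × PySem.Set String)) : List (String × String) :=
  tbl.flatMap (fun p => p.2.map (fun v => (v, p.1)))

-- drop later occurrences of a key (first occurrence wins); fuel-based structural recursion
def pvDedupKeysF : Nat → List (String × String) → List (String × String)
  | _, [] => []
  | 0, l => l
  | n + 1, (k, v) :: rest => (k, v) :: pvDedupKeysF n (rest.filter (fun p => p.1 != k))

theorem pv_get?_map_append (a g : String) (vs : List String) (rest : List (String × String)) :
    (PySem.Dict.mk (vs.map (fun v => (v, g)) ++ rest)).get? a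
      = if a ∈ vs then some g else (PySem.Dict.mk rest).get? a := by
  induction vs with
  | nil => simp
  | cons v vs ih =>
    simp only [List.map_cons, List.cons_append, PySem.Dict.get?_mk_cons, ih]
    by_cases h : v = a
    · subst h; simp
    · simp [List.mem_cons, h, Ne.symm h]

theorem pv_scan_eq_flat (a : String) (tbl : List (String × PySem.Set String)) :
    pvScanGroups a tbl = (PySem.Dict.mk (pvFlat tbl)).get? a := by
  induction tbl with
  | nil => simp [pvScanGroups, pvFlat, PySem.Dict.get?]
  | cons p tbl ih =>
    obtain ⟨g, vs⟩ := p
    simp only [pvScanGroups, pvFlat, List.flatMap_cons]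
    rw [pv_get?_map_append]
    by_cases h : a ∈ vs
    · have hc : PySem.Set.contains vs a = true := by simpa [PySem.Set.contains] using h
      simp [h]
    · have hc : PySem.Set.contains vs a = false := by simpa [PySem.Set.contains] using h
      simpa [hc, h, pvFlat] using ih

theorem pv_get?_filter_ne (a k : String) (h : a ≠ k) (l : List (String × String)) :
    (PySem.Dict.mk (l.filter (fun p => p.1 != k))).get? a = (PySem.Dict.mk l).get? a := by
  induction l with
  | nil => rfl
  | cons p l ih =>
    obtain ⟨k', v'⟩ := p
    by_cases hk : k' = k
    · subst hk
      simp [PySem.Dict.get?_mk_cons, ih, Ne.symm h]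
    · simp [hk, PySem.Dict.get?_mk_cons, ih]

theorem pv_get?_dedup (a : String) (fuel : Nat) (l : List (String × String)) :
    (PySem.Dict.mk (pvDedupKeysF fuel l)).get? a = (PySem.Dict.mk l).get? a := by
  induction fuel generalizing l with
  | zero => cases l <;> rfl
  | succ n ih =>
    cases l with
    | nil => rfl
    | cons p rest =>
      obtain ⟨k, v⟩ := p
      rw [pvDedupKeysF, PySem.Dict.get?_mk_cons, PySem.Dict.get?_mk_cons]
      by_cases h : k = a
      · simp [h]
      · simp only [beq_iff_eq, h, if_false]
        rw [ih, pv_get?_filter_ne a k (Ne.symm h)]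

theorem pv_table_eq : pvVerbTable = pvDedupKeysF 78 (pvFlat pvActionGroups) := by decide

-- ===== VERDICT (by name: the statement is the Claim_ definition above) =====
theorem match_action_group_spec : Claim_equal_match_action_group := by
  intro action _
  unfold Spec_match_action_group match_action_group match_action_group_alt pvVerbToGroup
  cases action with
  | none => rfl
  | some s =>
    simp only []
    rw [pv_scan_eq_flat, pv_table_eq, pv_get?_dedup]
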